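-- pv_equiv track=rewrite | github.com/JohnEdwards700/Machine_Learning | LSTM/ltsmmodel.py | seqs_to_dictionary
-- ===== SOURCE A (Python) =====
-- def seqs_to_dictionary(training_data: list):
--      word_to_ix = {}
--      tag_to_ix = {}
--      word_count = tag_count = 0
--
--      for sent, tags in training_data:
--         for word in sent:
--            if word not in word_to_ix:
--               word_to_ix[word] = word_count
--               word_count += 1
--         for tag in tags:
--            if tag not in tag_to_ix:
--               tag_to_ix[tag] = tag_count
--               tag_count += 1
--
--      return word_to_ix, tag_to_ix
-- ===== SOURCE B (Python) =====
-- def seqs_to_dictionary(training_data: list):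
--     all_words = []
--     all_tags = []
--     for sent, tags in training_data:
--         all_words.extend(sent)
--         all_tags.extend(tags)
--     word_to_ix = {w: i for i, w in enumerate(dict.fromkeys(all_words))}
--     tag_to_ix = {t: i for i, t in enumerate(dict.fromkeys(all_tags))}
--     return word_to_ix, tag_to_ix
-- ===== Notes on version B (the rewrite author's own statement) =====
-- stated objective: simpler
-- what changed: Replaces the fused single-pass membership-and-counter loops with a flatten-then-dedup-then-enumerate decomposition: collect all words/tags into flat lists, deduplicate preserving first occurrence with dict.fromkeys, and enumerate to assign indices.
import Mathlib
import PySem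

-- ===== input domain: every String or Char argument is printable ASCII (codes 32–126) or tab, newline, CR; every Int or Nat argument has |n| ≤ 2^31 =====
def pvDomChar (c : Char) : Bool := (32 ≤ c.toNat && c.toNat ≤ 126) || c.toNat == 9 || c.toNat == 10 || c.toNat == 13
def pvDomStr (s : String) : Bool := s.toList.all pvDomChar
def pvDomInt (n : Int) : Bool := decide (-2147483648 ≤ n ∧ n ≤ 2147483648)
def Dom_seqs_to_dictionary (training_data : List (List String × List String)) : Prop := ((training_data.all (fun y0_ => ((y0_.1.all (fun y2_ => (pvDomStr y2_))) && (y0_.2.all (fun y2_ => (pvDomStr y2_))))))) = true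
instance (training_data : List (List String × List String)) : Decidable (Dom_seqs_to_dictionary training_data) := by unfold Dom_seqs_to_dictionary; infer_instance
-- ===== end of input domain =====

-- B replaces A's fused membership-and-counter loops by flatten, dedup (dict.fromkeys) and
-- enumerate — a simpler decomposition, same result.

-- ===== PORT A =====
-- the body of A's inner 'if word not in d: d[word] = count; count += 1'
def pvStep (s : PySem.Dict String Int × Int) (w : String) : PySem.Dict String Int × Int :=
  if s.1.contains w then s else (s.1.insert w s.2, s.2 + 1)

def seqs_to_dictionary (training_data : List (List String × List String)) :
    (List (String × Int)) × (List (String × Int)) :=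
  let st :=
    training_data.foldl
      (fun st p =>
        let s1 := p.1.foldl pvStep (st.1, st.2.2.1)
        let s2 := p.2.foldl pvStep (st.2.1, st.2.2.2)
        (s1.1, s2.1, s1.2, s2.2))
      ((PySem.Dict.empty, PySem.Dict.empty, 0, 0) :
        PySem.Dict String Int × PySem.Dict String Int × Int × Int)
  (st.1.items, st.2.1.items)

-- ===== PORT B =====
def seqs_to_dictionary_alt (training_data : List (List String × List String)) :
    (List (String × Int)) × (List (String × Int)) :=
  let all_words := training_data.foldl (fun acc p => acc ++ p.1) []
  let all_tags  := training_data.foldl (fun acc p => acc ++ p.2) []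
  let word_to_ix := (PySem.List.enumerate (PySem.List.dedup all_words)).map (fun p => (p.2, p.1))
  let tag_to_ix  := (PySem.List.enumerate (PySem.List.dedup all_tags)).map (fun p => (p.2, p.1))
  (word_to_ix, tag_to_ix)

-- ===== PRECONDITION & SPEC =====
def Spec_seqs_to_dictionary (training_data : List (List String × List String)) (out : (List (String × Int)) × (List (String × Int))) : Prop := out = seqs_to_dictionary_alt training_data
instance (training_data : List (List String × List String)) (out : (List (String × Int)) × (List (String × Int))) : Decidable (Spec_seqs_to_dictionary training_data out) := by unfold Spec_seqs_to_dictionary; infer_instance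

-- ===== CLAIM (what is proved, stated in full; the proofs are below) =====
def Claim_equal_seqs_to_dictionary : Prop := ∀ (training_data : List (List String × List String)), Dom_seqs_to_dictionary training_data → Spec_seqs_to_dictionary training_data (seqs_to_dictionary training_data)

-- ===== LEMMAS AND PROOFS =====

-- the index dict whose keys, in order, are us and whose values count up from 0
def pvD (us : List String) : PySem.Dict String Int :=
  PySem.Dict.mk ((PySem.List.enumerate us).map (fun p => (p.2, p.1)))

theorem pvD_keys (us : List String) : (pvD us).keys = us := by
  simp [pvD, PySem.Dict.keys, PySem.List.map_snd_enumerate, Function.comp_def]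

theorem pvD_contains (us : List String) (w : String) :
    (pvD us).contains w = decide (w ∈ us) := by
  rw [PySem.Dict.contains_eq_decide_mem_keys, pvD_keys]

theorem pvD_snoc (us : List String) (w : String) (hw : w ∉ us) :
    (pvD us).insert w (us.length : Int) = pvD (us ++ [w]) := by
  apply PySem.Dict.ext
  have hc : (pvD us).contains w = false := by simp [pvD_contains, hw]
  rw [PySem.Dict.items_insert, hc]
  simp [pvD, PySem.List.enumerate_append, PySem.List.enumerate_cons,
    PySem.List.enumerate_nil]

theorem pvStep_inv (ws us : List String) :
    ws.foldl pvStep (pvD us, (us.length : Int)) =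
      (pvD (PySem.Set.update us ws), ((PySem.Set.update us ws).length : Int)) := by
  induction ws generalizing us with
  | nil => simp [PySem.Set.update]
  | cons w ws ih =>
    by_cases hw : w ∈ us
    · have h1 : pvStep (pvD us, (us.length : Int)) w = (pvD us, (us.length : Int)) := by
        simp [pvStep, pvD_contains, hw]
      have h2 : PySem.Set.add us w = us := by
        simp [PySem.Set.add, PySem.Set.contains, hw]
      simpa [List.foldl_cons, h1, PySem.Set.update, h2] using ih us
    · have h1 : pvStep (pvD us, (us.length : Int)) w
          = (pvD (us ++ [w]), ((us ++ [w]).length : Int)) := by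
        simp [pvStep, pvD_contains, hw, pvD_snoc us w hw]
      have h2 : PySem.Set.add us w = us ++ [w] := by
        simp [PySem.Set.add, PySem.Set.contains, hw]
      simpa [List.foldl_cons, h1, PySem.Set.update, h2] using ih (us ++ [w])

-- A's fused loop over pairs splits into two independent loops over the flattened streams
theorem pvSplit (td : List (List String × List String))
    (dw dt : PySem.Dict String Int) (cw ct : Int) :
    td.foldl
      (fun st p =>
        let s1 := p.1.foldl pvStep (st.1, st.2.2.1)
        let s2 := p.2.foldl pvStep (st.2.1, st.2.2.2)
        (s1.1, s2.1, s1.2, s2.2))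
      (dw, dt, cw, ct) =
      (((td.flatMap (·.1)).foldl pvStep (dw, cw)).1,
       ((td.flatMap (·.2)).foldl pvStep (dt, ct)).1,
       ((td.flatMap (·.1)).foldl pvStep (dw, cw)).2,
       ((td.flatMap (·.2)).foldl pvStep (dt, ct)).2) := by
  induction td generalizing dw dt cw ct with
  | nil => simp
  | cons p td ih =>
    simp only [List.foldl_cons, List.flatMap_cons, List.foldl_append]
    rw [ih]

-- ===== VERDICT (by name: the statement is the Claim_ definition above) =====
theorem seqs_to_dictionary_spec : Claim_equal_seqs_to_dictionary := by
  intro td _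
  show seqs_to_dictionary td = seqs_to_dictionary_alt td
  have hE : (PySem.Dict.empty : PySem.Dict String Int) = pvD [] := rfl
  have hW : (td.flatMap (·.1)).foldl pvStep (pvD [], (0 : Int)) =
      (pvD (PySem.Set.update [] (td.flatMap (·.1))),
        ((PySem.Set.update [] (td.flatMap (·.1))).length : Int)) := by
    simpa using pvStep_inv (td.flatMap (·.1)) []
  have hT : (td.flatMap (·.2)).foldl pvStep (pvD [], (0 : Int)) =
      (pvD (PySem.Set.update [] (td.flatMap (·.2))),
        ((PySem.Set.update [] (td.flatMap (·.2))).length : Int)) := by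
    simpa using pvStep_inv (td.flatMap (·.2)) []
  simp only [seqs_to_dictionary, seqs_to_dictionary_alt, pvSplit, hE,
    PySem.List.foldl_append_eq_flatMap, List.nil_append,
    PySem.List.dedup_eq_ofList]
  rw [hW, hT]
  simp [PySem.Set.update, PySem.Set.ofList_eq_foldl, pvD]
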